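-- pv_equiv track=rewrite | github.com/aSchuhknecht/blackjackSimulator | utils.py | check_for_bust
-- ===== SOURCE A (Python) =====
-- def numeric(card):
--     if card == 'A':
--         return 11
--     elif card == 'T' or card == 'J' or card == 'Q' or card == 'K':
--         return 10
--     else:
--         return int(card)
--
-- def check_for_bust(cards):
--     total = 0  # allows for four possible aces
--
--     for i in range(0, len(cards)):
--         total += numeric(cards[i])
--
--     if 'A' in cards:
--         run, total = handle_aces(cards)
--         return run
--     else:
--         if total > 21:
--             return False
--         else:
--             return True
--
-- def handle_aces(cards):
--     num_aces = cards.count('A')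
--     hard_total = 0
--     for i in range(0, len(cards)):
--         if cards[i] != 'A':
--             hard_total += numeric(cards[i])
--
--     # try using one ace as 11
--     new_total = hard_total + 11 + (num_aces - 1)
--     if new_total > 21:
--         new_total = hard_total + num_aces  # using all aces as 1s
--         if new_total > 21:
--             return False, new_total
--         else:
--             return True, new_total
--     else:
--         return True, new_total
-- ===== SOURCE B (Python) =====
-- def check_for_bust(cards):
--     total = 0
--     aces = 0
--     for c in cards:
--         if c == 'A':
--             total += 11
--             aces += 1
--         elif c in ('T', 'J', 'Q', 'K'):
--             total += 10
--         else:
--             total += int(c)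
--     while total > 21 and aces > 0:
--         total -= 10
--         aces -= 1
--     return total <= 21
-- ===== Notes on version B (the rewrite author's own statement) =====
-- stated objective: idiomatic
-- what changed: One pass accumulates the total (aces counted as 11) and the number of aces, then the standard iterative ace-demotion loop (while total>21 and aces: total-=10) replaces A's two separate summing loops and handle_aces's closed-form two-case ace test.
import Mathlib
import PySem

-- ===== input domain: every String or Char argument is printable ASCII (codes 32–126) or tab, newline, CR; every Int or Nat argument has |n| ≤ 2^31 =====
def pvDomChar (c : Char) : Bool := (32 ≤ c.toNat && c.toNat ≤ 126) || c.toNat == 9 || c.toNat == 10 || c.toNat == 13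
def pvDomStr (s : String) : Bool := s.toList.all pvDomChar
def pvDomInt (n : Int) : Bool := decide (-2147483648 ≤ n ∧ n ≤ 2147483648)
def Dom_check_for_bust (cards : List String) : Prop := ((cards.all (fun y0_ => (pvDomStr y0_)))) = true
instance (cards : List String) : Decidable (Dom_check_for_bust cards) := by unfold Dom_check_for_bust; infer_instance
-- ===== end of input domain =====

-- B merges A's two summing loops and handle_aces's closed-form two-case ace test into one
-- accumulation pass plus the standard iterative ace-demotion loop (idiomatic blackjack form).

-- ===== PORT A =====
-- numeric(card); outside Pre_ Python raises ValueError, here the getD 0 value is never claimed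
def pyNumeric (card : String) : Int :=
  if card = "A" then 11
  else if card = "T" ∨ card = "J" ∨ card = "Q" ∨ card = "K" then 10
  else (PySem.Int.ofStr? card).getD 0

-- handle_aces(cards)
def handle_aces (cards : List String) : Bool × Int :=
  let num_aces : Int := PySem.List.count cards "A"
  let hard_total : Int := cards.foldl (fun t c => if c ≠ "A" then t + pyNumeric c else t) 0
  let new_total := hard_total + 11 + (num_aces - 1)
  if new_total > 21 then
    let new_total := hard_total + num_aces
    if new_total > 21 then (false, new_total) else (true, new_total)
  else (true, new_total)

def check_for_bust (cards : List String) : Bool :=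
  let total : Int := cards.foldl (fun t c => t + pyNumeric c) 0
  if cards.contains "A" then (handle_aces cards).1
  else if total > 21 then false else true

-- ===== PORT B =====
-- the single accumulation pass of Source B's for-loop
def bustAccum : List String → Int → Nat → Int × Nat
  | [], total, aces => (total, aces)
  | c :: rest, total, aces =>
      if c = "A" then bustAccum rest (total + 11) (aces + 1)
      else if c = "T" ∨ c = "J" ∨ c = "Q" ∨ c = "K" then bustAccum rest (total + 10) aces
      else bustAccum rest (total + (PySem.Int.ofStr? c).getD 0) aces

-- Source B's while-loop: while total > 21 and aces > 0: total -= 10; aces -= 1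
def demoteAces : Int → Nat → Int
  | total, 0 => total
  | total, aces + 1 => if total > 21 then demoteAces (total - 10) aces else total

def check_for_bust_alt (cards : List String) : Bool :=
  let (total, aces) := bustAccum cards 0 0
  decide (demoteAces total aces ≤ 21)

-- ===== PRECONDITION & SPEC =====
-- Pre_ excludes exactly the hands on which Python's int(card) raises ValueError (both A and B raise there).
def Pre_check_for_bust (cards : List String) : Prop :=
  ∀ c ∈ cards, c = "A" ∨ c = "T" ∨ c = "J" ∨ c = "Q" ∨ c = "K" ∨ (PySem.Int.ofStr? c).isSome
instance (cards : List String) : Decidable (Pre_check_for_bust cards) := by unfold Pre_check_for_bust; infer_instance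
def pvWitness_check_for_bust : List String := ["A", "7", "K", "A"]

def Spec_check_for_bust (cards : List String) (out : Bool) : Prop := out = check_for_bust_alt cards
instance (cards : List String) (out : Bool) : Decidable (Spec_check_for_bust cards out) := by unfold Spec_check_for_bust; infer_instance

-- ===== CLAIM (what is proved, stated in full; the proofs are below) =====
def Claim_equal_check_for_bust : Prop := ∀ (cards : List String), Dom_check_for_bust cards → Pre_check_for_bust cards → Spec_check_for_bust cards (check_for_bust cards)

-- ===== LEMMAS AND PROOFS =====

-- Source B's while-loop ends ≤ 21 iff even full demotion of every ace lands ≤ 21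
theorem demoteAces_le (aces : Nat) : ∀ total : Int,
    (demoteAces total aces ≤ 21 ↔ total - 10 * (aces : Int) ≤ 21) := by
  induction aces with
  | zero => intro total; simp [demoteAces]
  | succ a ih =>
      intro total
      simp only [demoteAces]
      split_ifs with h
      · rw [ih]; push_cast; omega
      · push_cast; omega

theorem foldl_sum_numeric (cards : List String) : ∀ t : Int,
    cards.foldl (fun t c => t + pyNumeric c) t = t + (cards.map pyNumeric).sum := by
  induction cards with
  | nil => simp
  | cons c rest ih => intro t; simp [List.foldl, ih]; ring

theorem foldl_hard (cards : List String) : ∀ t : Int,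
    cards.foldl (fun t c => if c ≠ "A" then t + pyNumeric c else t) t
      = t + ((cards.filter (· ≠ "A")).map pyNumeric).sum := by
  induction cards with
  | nil => simp
  | cons c rest ih =>
      intro t
      rw [List.foldl_cons, ih, List.filter_cons]
      by_cases hc : c = "A" <;> simp [hc] <;> ring

theorem bustAccum_eq (cards : List String) : ∀ (t : Int) (a : Nat),
    bustAccum cards t a = (t + (cards.map pyNumeric).sum, a + cards.count "A") := by
  induction cards with
  | nil => simp [bustAccum]
  | cons c rest ih =>
      intro t a
      by_cases hA : c = "A"
      · simp [bustAccum, hA, ih, pyNumeric, List.count_cons]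
        constructor
        · ring
        · omega
      · by_cases hF : c = "T" ∨ c = "J" ∨ c = "Q" ∨ c = "K"
        · simp [bustAccum, hA, hF, ih, pyNumeric, List.count_cons, hF]
          ring
        · simp [bustAccum, hA, hF, ih, pyNumeric, List.count_cons]
          ring

theorem sum_split (cards : List String) :
    (cards.map pyNumeric).sum
      = ((cards.filter (· ≠ "A")).map pyNumeric).sum + 11 * (cards.count "A" : Int) := by
  induction cards with
  | nil => simp
  | cons c rest ih =>
      by_cases hc : c = "A"
      · simp [hc, List.count_cons, ih, pyNumeric]; push_cast; ring
      · simp [hc, List.count_cons, ih]; ring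

-- ===== VERDICT (by name: the statement is the Claim_ definition above) =====
theorem check_for_bust_spec : Claim_equal_check_for_bust := by
  intro cards _ _
  unfold Spec_check_for_bust check_for_bust check_for_bust_alt handle_aces
  rw [bustAccum_eq]
  simp only [foldl_sum_numeric, foldl_hard, PySem.List.count_eq, zero_add]
  have hsplit := sum_split cards
  set S := (cards.map pyNumeric).sum with hS
  set H := ((cards.filter (· ≠ "A")).map pyNumeric).sum with hH
  set k := cards.count "A" with hk
  have hdem : demoteAces S k ≤ 21 ↔ S - 10 * (k : Int) ≤ 21 := demoteAces_le k S
  have hcont : cards.contains "A" = true ↔ k ≠ 0 := by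
    simp [hk, ← List.count_pos_iff]; omega
  by_cases hmem : cards.contains "A" = true
  · have hkpos : k ≠ 0 := hcont.mp hmem
    simp only [hmem, if_true]
    split_ifs with h1 h2 <;>
      [ (rw [eq_comm, decide_eq_false_iff_not, hdem]; omega);
        (rw [eq_comm, decide_eq_true_iff, hdem]; omega);
        (rw [eq_comm, decide_eq_true_iff, hdem]; omega) ]
  · have hk0 : k = 0 := by by_contra h; exact hmem (hcont.mpr h)
    simp only [hmem, if_false, Bool.false_eq_true]
    split_ifs with h1
    · rw [eq_comm, decide_eq_false_iff_not, hdem, hk0]; push_cast; omega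
    · rw [eq_comm, decide_eq_true_iff, hdem, hk0]; push_cast; omega
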